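-- pv_equiv track=rewrite | github.com/fborzi/programacion-actividad4 | pareja13/funciones.py | contarPoblacion
-- ===== SOURCE A (Python) =====
-- def obtenerCiudad(personas, DNI):
--     # Recorremos la lista de personas
--     for persona in personas:
--         # Si el DNI coincide, devolvemos la ciudad (posición 2)
--         if persona[1] == DNI:
--             return persona[2]
--     # Si no se encuentra el DNI, devolvemos None
--     return None
--
-- def obtenerProvincia(personas, ciudades, DNI):
--     # Primero obtenemos la ciudad donde vive la persona
--     ciudad = obtenerCiudad(personas, DNI)
--
--     # Si la ciudad no existe, devolvemos None
--     if ciudad is None: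
--         return None
--
--     # Recorremos la lista de ciudades para encontrar la provincia
--     for c in ciudades:
--         # Si el nombre de la ciudad coincide, devolvemos la provincia
--         if c[0] == ciudad:
--             return c[1]
--
--     # Si no se encuentra la ciudad en la lista, devolvemos None
--     return None
--
-- def contarPoblacion(personas, ciudades, provincia):
--     contador = 0  # Inicializamos el contador en 0
--
--     # Recorremos todas las personas
--     for persona in personas:
--         # Obtenemos el DNI de cada persona
--         dni = persona[1]
--         # Obtenemos la provincia donde vive
--         prov = obtenerProvincia(personas, ciudades, dni)
--         # Si la provincia coincide con la buscada, aumentamos el contador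
--         if prov == provincia:
--             contador += 1
--
--     # Al final, devolvemos la cantidad total
--     return contador
-- ===== SOURCE B (Python) =====
-- def contarPoblacion(personas, ciudades, provincia):
--     # province of each city: first occurrence wins (matches the first match of a linear scan)
--     prov_of_city = {}
--     for c in ciudades:
--         if c[0] not in prov_of_city:
--             prov_of_city[c[0]] = c[1]
--     # city of each DNI: first occurrence wins
--     city_of_dni = {}
--     for p in personas:
--         if p[1] not in city_of_dni:
--             city_of_dni[p[1]] = p[2]
--     return sum(1 for p in personas
--                if prov_of_city.get(city_of_dni[p[1]]) == provincia)
-- ===== Notes on version B (the rewrite author's own statement) =====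
-- stated objective: alternative
-- what changed: Replaces A's per-person rescans of both lists with two first-occurrence dictionaries (DNI->city, city->province) built once, then one counting pass (an index-based algorithm in place of nested linear scans).
-- outside the precondition, e.g. on contarPoblacion([], [('X',)], 'P'): A returns 0, B raises IndexError; on contarPoblacion([('a', '1', 'X')], [('X', 'P'), ('Y',)], 'P'): A returns 1, B raises IndexError; on contarPoblacion([('a', '1', 'X'), ('b', '1')], [('X', 'P')], 'P'): A returns 2, B returns 2
import Mathlib
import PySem

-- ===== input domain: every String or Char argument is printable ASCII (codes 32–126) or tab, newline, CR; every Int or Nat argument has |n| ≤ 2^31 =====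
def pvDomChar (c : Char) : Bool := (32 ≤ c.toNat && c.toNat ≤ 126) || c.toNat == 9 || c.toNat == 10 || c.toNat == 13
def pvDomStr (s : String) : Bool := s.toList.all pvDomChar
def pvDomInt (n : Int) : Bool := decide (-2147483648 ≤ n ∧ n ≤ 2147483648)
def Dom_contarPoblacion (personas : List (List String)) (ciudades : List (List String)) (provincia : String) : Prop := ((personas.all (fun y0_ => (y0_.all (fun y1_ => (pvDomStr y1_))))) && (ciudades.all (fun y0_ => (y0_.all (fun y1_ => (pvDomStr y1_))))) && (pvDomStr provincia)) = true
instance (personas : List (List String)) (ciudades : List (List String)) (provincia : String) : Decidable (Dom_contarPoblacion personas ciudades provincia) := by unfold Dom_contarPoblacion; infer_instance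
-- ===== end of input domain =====

-- B replaces A's per-person rescans of both lists with two first-occurrence dictionaries
-- (DNI->city, city->province) built once, then a single counting pass (objective: alternative).


-- ===== PORT A =====
-- exact transliteration of obtenerCiudad (indexing via pyGet?, default irrelevant inside Pre_)
def obtenerCiudad (personas : List (List String)) (DNI : String) : Option String :=
  match personas with
  | [] => none
  | persona :: rest =>
      if ((PySem.List.pyGet? persona 1).getD "") == DNI then
        some ((PySem.List.pyGet? persona 2).getD "")
      else obtenerCiudad rest DNI

-- the second loop of obtenerProvincia
def buscarProvincia (ciudades : List (List String)) (ciudad : String) : Option String :=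
  match ciudades with
  | [] => none
  | c :: rest =>
      if ((PySem.List.pyGet? c 0).getD "") == ciudad then
        some ((PySem.List.pyGet? c 1).getD "")
      else buscarProvincia rest ciudad

def obtenerProvincia (personas : List (List String)) (ciudades : List (List String)) (DNI : String) : Option String :=
  match obtenerCiudad personas DNI with
  | none => none
  | some ciudad => buscarProvincia ciudades ciudad

def contarPoblacion (personas : List (List String)) (ciudades : List (List String)) (provincia : String) : Int :=
  personas.foldl (fun contador persona =>
    let dni := (PySem.List.pyGet? persona 1).getD ""
    let prov := obtenerProvincia personas ciudades dni
    if prov == some provincia then contador + 1 else contador) 0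

-- ===== PORT B =====
def contarPoblacion_alt (personas : List (List String)) (ciudades : List (List String)) (provincia : String) : Int :=
  let provOfCity : PySem.Dict String String :=
    ciudades.foldl (fun d c =>
      if d.contains ((PySem.List.pyGet? c 0).getD "") then d
      else d.insert ((PySem.List.pyGet? c 0).getD "") ((PySem.List.pyGet? c 1).getD "")) PySem.Dict.empty
  let cityOfDni : PySem.Dict String String :=
    personas.foldl (fun d p =>
      if d.contains ((PySem.List.pyGet? p 1).getD "") then d
      else d.insert ((PySem.List.pyGet? p 1).getD "") ((PySem.List.pyGet? p 2).getD "")) PySem.Dict.empty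
  Int.ofNat (personas.countP (fun p =>
    ((cityOfDni.get? ((PySem.List.pyGet? p 1).getD "")).bind
      (fun city => provOfCity.get? city)) == some provincia))

-- ===== PRECONDITION & SPEC =====
-- Pre_ restricts to well-formed tables (person rows with ≥3 fields, city rows with ≥2);
-- outside it at least one of the two Pythons raises IndexError on most inputs, though A still
-- returns on ragged rows its scans never read past (then B raises building its dictionaries) and
-- on duplicate-DNI short rows (where both agree).
def Pre_contarPoblacion (personas : List (List String)) (ciudades : List (List String)) (provincia : String) : Prop :=
  (∀ p ∈ personas, 3 ≤ p.length) ∧ (∀ c ∈ ciudades, 2 ≤ c.length)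
instance (personas : List (List String)) (ciudades : List (List String)) (provincia : String) : Decidable (Pre_contarPoblacion personas ciudades provincia) := by unfold Pre_contarPoblacion; infer_instance

def pvWitness_contarPoblacion : List (List String) × List (List String) × String :=
  ([["Ana", "1", "X"], ["Bob", "2", "Y"]], [["X", "P"], ["Y", "Q"]], "P")

def Spec_contarPoblacion (personas : List (List String)) (ciudades : List (List String)) (provincia : String) (out : Int) : Prop := out = contarPoblacion_alt personas ciudades provincia
instance (personas : List (List String)) (ciudades : List (List String)) (provincia : String) (out : Int) : Decidable (Spec_contarPoblacion personas ciudades provincia out) := by unfold Spec_contarPoblacion; infer_instance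

-- ===== CLAIM (what is proved, stated in full; the proofs are below) =====
def Claim_equal_contarPoblacion : Prop := ∀ (personas : List (List String)) (ciudades : List (List String)) (provincia : String), Dom_contarPoblacion personas ciudades provincia → Pre_contarPoblacion personas ciudades provincia → Spec_contarPoblacion personas ciudades provincia (contarPoblacion personas ciudades provincia)

-- ===== LEMMAS AND PROOFS =====

-- first-match lookup for a first-occurrence-insert dictionary fold
theorem foldFirstOcc_get (key val : List String → String) (l : List (List String))
    (d : PySem.Dict String String) (x : String) :
    ((l.foldl (fun d c =>
        if d.contains (key c) then d else d.insert (key c) (val c)) d).get? x)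
    = ((d.get? x).or
        (match l.find? (fun c => key c == x) with
         | none => none
         | some c => some (val c))) := by
  induction l generalizing d with
  | nil => cases h : d.get? x <;> simp [h]
  | cons c rest ih =>
    simp only [List.foldl_cons, List.find?_cons]
    by_cases hc : d.contains (key c) = true
    · rw [if_pos hc, ih]
      by_cases hk : key c = x
      · obtain ⟨v, hv⟩ : ∃ v, d.get? x = some v := by
          rw [← hk]
          exact Option.ne_none_iff_exists'.mp ((PySem.Dict.get?_eq_none_iff_contains d (key c)).not.mpr (by simp [hc]))
        simp [hv, hk]
      · have : (key c == x) = false := by simp [hk]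
        simp [this]
    · rw [if_neg hc, ih, PySem.Dict.get?_insert]
      by_cases hk : key c = x
      · have hd : d.get? x = none := by
          rw [← hk]
          exact (PySem.Dict.get?_eq_none_iff_contains d (key c)).mpr (by simpa using hc)
        simp [hk, hd]
      · have hb : (key c == x) = false := by simp [hk]
        have hx : ¬ (x = key c) := fun h => hk h.symm
        simp [hb, hx]

theorem obtenerCiudad_eq_find (personas : List (List String)) (x : String) :
    obtenerCiudad personas x
    = (match personas.find? (fun p => ((PySem.List.pyGet? p 1).getD "") == x) with
       | none => none
       | some p => some ((PySem.List.pyGet? p 2).getD "")) := by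
  induction personas with
  | nil => rfl
  | cons p rest ih =>
    simp only [obtenerCiudad, List.find?_cons]
    by_cases h : ((PySem.List.pyGet? p 1).getD "") == x <;> simp [h, ih]

theorem buscarProvincia_eq_find (ciudades : List (List String)) (x : String) :
    buscarProvincia ciudades x
    = (match ciudades.find? (fun c => ((PySem.List.pyGet? c 0).getD "") == x) with
       | none => none
       | some c => some ((PySem.List.pyGet? c 1).getD "")) := by
  induction ciudades with
  | nil => rfl
  | cons c rest ih =>
    simp only [buscarProvincia, List.find?_cons]
    by_cases h : ((PySem.List.pyGet? c 0).getD "") == x <;> simp [h, ih]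

-- counting fold = countP
theorem foldl_count (P : List String → Bool) (l : List (List String)) (n : Int) :
    l.foldl (fun contador p => if P p then contador + 1 else contador) n
    = n + Int.ofNat (l.countP P) := by
  induction l generalizing n with
  | nil => simp
  | cons p rest ih =>
    simp only [List.foldl_cons, List.countP_cons]
    by_cases h : P p <;> simp [h, ih] <;> omega

-- ===== VERDICT (by name: the statement is the Claim_ definition above) =====

theorem contarPoblacion_spec : Claim_equal_contarPoblacion := by
  intro personas ciudades provincia _ _
  unfold Spec_contarPoblacion contarPoblacion contarPoblacion_alt
  rw [foldl_count, zero_add]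
  congr 1
  apply List.countP_congr
  intro p _
  simp only [foldFirstOcc_get, PySem.Dict.get?_empty, Option.none_or]
  unfold obtenerProvincia
  rw [obtenerCiudad_eq_find]
  cases h : personas.find? (fun q => ((PySem.List.pyGet? q 1).getD "") == ((PySem.List.pyGet? p 1).getD "")) with
  | none => simp
  | some q =>
    dsimp only
    rw [buscarProvincia_eq_find]
    cases hf : ciudades.find? (fun c => ((PySem.List.pyGet? c 0).getD "") == ((PySem.List.pyGet? q 2).getD "")) <;>
      simp [hf]
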